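-- pv_equiv track=rewrite | github.com/SKTeamLab/esm-msr | src/esm_msr/utils.py | determine_diffs
-- ===== SOURCE A (Python) =====
-- def determine_diffs(aligned_seq1, aligned_seq2):
--     # Get the list of differences (position, wild_type, mutation)
--     differences = []
--     position = 0  # Position in the aligned sequences
--
--     # Adjust to ensure we're comparing the correct subsequence
--     for i, (mut, wt) in enumerate(zip(aligned_seq1, aligned_seq2)):
--         if mut == '-' or wt == '-':
--             if i < len(aligned_seq1) - 1 and (aligned_seq1[i+1] == '-' or aligned_seq2[i+1] == '-'):
--                 # Skip over any leading or trailing gaps, keep position unchanged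
--                 continue
--         if mut != wt and mut != '-' and wt != '-':
--             # Record the position and the difference
--             differences.append((wt, position+1, mut))
--         if mut != '-':
--             # Only increment the position counter when seq1 moves forward
--             position += 1
--
--     return differences
-- ===== SOURCE B (Python) =====
-- def determine_diffs(aligned_seq1, aligned_seq2):
--     # Two-pass: precompute a skip mask and a prefix-position array, then emit diffs.
--     n = min(len(aligned_seq1), len(aligned_seq2))
--     skip = [(aligned_seq1[i] == '-' or aligned_seq2[i] == '-')
--             and i < n - 1
--             and (aligned_seq1[i + 1] == '-' or aligned_seq2[i + 1] == '-')
--             for i in range(n)]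
--     pos = [0]
--     for i in range(n):
--         pos.append(pos[i] + (0 if skip[i] or aligned_seq1[i] == '-' else 1))
--     return [(aligned_seq2[i], pos[i] + 1, aligned_seq1[i])
--             for i in range(n)
--             if not skip[i] and aligned_seq1[i] != aligned_seq2[i]
--             and aligned_seq1[i] != '-' and aligned_seq2[i] != '-']
-- ===== Notes on version B (the rewrite author's own statement) =====
-- stated objective: alternative
-- what changed: Replaced A's single stateful loop (running position counter with a continue-based skip) by a two-pass scheme: precompute a boolean skip mask and a prefix-sum position array over the zip-truncated length, then emit the diff list as one comprehension.
import Mathlib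
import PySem

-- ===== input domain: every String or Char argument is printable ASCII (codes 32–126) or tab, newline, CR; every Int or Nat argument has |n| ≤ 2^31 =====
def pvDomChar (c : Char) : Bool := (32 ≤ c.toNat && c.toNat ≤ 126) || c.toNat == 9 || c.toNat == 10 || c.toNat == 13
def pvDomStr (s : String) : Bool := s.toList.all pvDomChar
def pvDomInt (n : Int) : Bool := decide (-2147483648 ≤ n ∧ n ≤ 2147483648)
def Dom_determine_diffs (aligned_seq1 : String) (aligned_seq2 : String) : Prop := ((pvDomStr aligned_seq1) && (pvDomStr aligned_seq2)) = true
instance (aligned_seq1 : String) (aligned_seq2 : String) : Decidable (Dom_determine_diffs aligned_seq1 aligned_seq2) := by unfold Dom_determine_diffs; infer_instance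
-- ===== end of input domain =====

-- B replaces A's single stateful loop (running position counter, continue-based skip) by a
-- two-pass scheme: a precomputed skip mask and prefix-position array, then one comprehension
-- (alternative decomposition, same O(n) cost).

-- ===== PORT A =====
-- Literal port of A. The look-ahead aligned_seq2[i+1] is ported with the total pyGetD:
-- inside Pre_ that index is in range whenever Python evaluates it, so the port is exact there
-- (outside Pre_ the Python raises IndexError at that read).
def determine_diffs (aligned_seq1 : String) (aligned_seq2 : String) : List (String × Int × String) :=
  let l1 := aligned_seq1.toList
  let l2 := aligned_seq2.toList
  (List.foldl
    (fun (st : List (String × Int × String) × Int) (p : Int × Char × Char) =>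
      let i := p.1
      let mu := p.2.1
      let wt := p.2.2
      if (mu == '-' || wt == '-') &&
         (decide (i < (l1.length : Int) - 1) &&
          (PySem.List.pyGetD l1 (i + 1) ' ' == '-' || PySem.List.pyGetD l2 (i + 1) ' ' == '-'))
      then st  -- continue
      else
        let st1 := if mu != wt && mu != '-' && wt != '-'
          then (st.1 ++ [(String.ofList [wt], st.2 + 1, String.ofList [mu])], st.2)
          else st
        if mu != '-' then (st1.1, st1.2 + 1) else st1)
    ([], 0) (PySem.List.enumerate (List.zip l1 l2))).1

-- ===== PORT B =====
-- Port of Source B: skip mask over the zip length, prefix-position array, one comprehension.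
def determine_diffs_alt (aligned_seq1 : String) (aligned_seq2 : String) : List (String × Int × String) :=
  let l1 := aligned_seq1.toList
  let l2 := aligned_seq2.toList
  let n := min l1.length l2.length
  let skip := (List.range n).map (fun i =>
    (l1.getD i ' ' == '-' || l2.getD i ' ' == '-') && decide (i < n - 1) &&
    (l1.getD (i + 1) ' ' == '-' || l2.getD (i + 1) ' ' == '-'))
  let pos := (List.range n).foldl
    (fun (acc : List Int) i =>
      acc ++ [acc.getD i 0 + (if skip.getD i false || l1.getD i ' ' == '-' then 0 else 1)])
    [0]
  ((List.range n).filter (fun i =>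
      !skip.getD i false && l1.getD i ' ' != l2.getD i ' ' &&
      l1.getD i ' ' != '-' && l2.getD i ' ' != '-')).map
    (fun i => (String.ofList [l2.getD i ' '], pos.getD i 0 + 1, String.ofList [l1.getD i ' ']))

-- ===== PRECONDITION & SPEC =====
-- Pre_ excludes exactly the inputs on which Python A raises IndexError: aligned_seq2 is
-- shorter than aligned_seq1, the last zipped column touches a gap, and aligned_seq1's next
-- character is not '-', so A's look-ahead reads aligned_seq2 one past its end.
def Pre_determine_diffs (aligned_seq1 : String) (aligned_seq2 : String) : Prop :=
  ¬ (0 < aligned_seq2.toList.length ∧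
     aligned_seq2.toList.length < aligned_seq1.toList.length ∧
     (aligned_seq1.toList.getD (aligned_seq2.toList.length - 1) ' ' = '-' ∨
      aligned_seq2.toList.getD (aligned_seq2.toList.length - 1) ' ' = '-') ∧
     aligned_seq1.toList.getD aligned_seq2.toList.length ' ' ≠ '-')
instance (aligned_seq1 : String) (aligned_seq2 : String) : Decidable (Pre_determine_diffs aligned_seq1 aligned_seq2) := by unfold Pre_determine_diffs; infer_instance

def pvWitness_determine_diffs : String × String := ("a-b", "acb")

def Spec_determine_diffs (aligned_seq1 : String) (aligned_seq2 : String) (out : List (String × Int × String)) : Prop := out = determine_diffs_alt aligned_seq1 aligned_seq2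
instance (aligned_seq1 : String) (aligned_seq2 : String) (out : List (String × Int × String)) : Decidable (Spec_determine_diffs aligned_seq1 aligned_seq2 out) := by unfold Spec_determine_diffs; infer_instance

-- ===== CLAIM (what is proved, stated in full; the proofs are below) =====
def Claim_equal_determine_diffs : Prop := ∀ (aligned_seq1 : String) (aligned_seq2 : String), Dom_determine_diffs aligned_seq1 aligned_seq2 → Pre_determine_diffs aligned_seq1 aligned_seq2 → Spec_determine_diffs aligned_seq1 aligned_seq2 (determine_diffs aligned_seq1 aligned_seq2)

-- ===== LEMMAS AND PROOFS =====

-- A's loop body, re-indexed over the Nat position in the zipped sequence.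
def pvStepA (l1 l2 : List Char) (st : List (String × Int × String) × Int) (k : Nat) :
    List (String × Int × String) × Int :=
  let mu := l1.getD k ' '
  let wt := l2.getD k ' '
  if (mu == '-' || wt == '-') &&
     (decide ((k : Int) < (l1.length : Int) - 1) &&
      (PySem.List.pyGetD l1 ((k : Int) + 1) ' ' == '-' ||
       PySem.List.pyGetD l2 ((k : Int) + 1) ' ' == '-'))
  then st
  else
    let st1 := if mu != wt && mu != '-' && wt != '-'
      then (st.1 ++ [(String.ofList [wt], st.2 + 1, String.ofList [mu])], st.2)
      else st
    if mu != '-' then (st1.1, st1.2 + 1) else st1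

-- B's skip mask / test / prefix position / output, as functions of the index.
def pvSkip (l1 l2 : List Char) (i : Nat) : Bool :=
  (l1.getD i ' ' == '-' || l2.getD i ' ' == '-') &&
  decide (i < min l1.length l2.length - 1) &&
  (l1.getD (i + 1) ' ' == '-' || l2.getD (i + 1) ' ' == '-')

def pvApp (l1 l2 : List Char) (k : Nat) : Bool :=
  l1.getD k ' ' != l2.getD k ' ' && l1.getD k ' ' != '-' && l2.getD k ' ' != '-'

def pvPos (l1 l2 : List Char) : Nat → Int
  | 0 => 0
  | k + 1 => pvPos l1 l2 k + (if pvSkip l1 l2 k || l1.getD k ' ' == '-' then 0 else 1)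

def pvOut (l1 l2 : List Char) (k : Nat) : List (String × Int × String) :=
  ((List.range k).filter (fun i => !pvSkip l1 l2 i && pvApp l1 l2 i)).map
    (fun i => (String.ofList [l2.getD i ' '], pvPos l1 l2 i + 1, String.ofList [l1.getD i ' ']))

theorem pvApp_dash (l1 l2 : List Char) (k : Nat) (h : pvApp l1 l2 k = true) :
    (l1.getD k ' ' == '-' || l2.getD k ' ' == '-') = false := by
  unfold pvApp at h
  by_cases h1 : l1.getD k ' ' = '-' <;> by_cases h2 : l2.getD k ' ' = '-' <;> simp_all

theorem pvApp_skip (l1 l2 : List Char) (k : Nat) (h : pvApp l1 l2 k = true) :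
    pvSkip l1 l2 k = false := by
  unfold pvSkip
  rw [pvApp_dash l1 l2 k h]
  simp

-- below the last zipped index, A's in-loop skip test agrees with B's skip mask
theorem pvSkipA_eq (l1 l2 : List Char) (k : Nat) (h : k + 1 < min l1.length l2.length) :
    ((l1.getD k ' ' == '-' || l2.getD k ' ' == '-') &&
     (decide ((k : Int) < (l1.length : Int) - 1) &&
      (PySem.List.pyGetD l1 ((k : Int) + 1) ' ' == '-' ||
       PySem.List.pyGetD l2 ((k : Int) + 1) ' ' == '-')))
    = pvSkip l1 l2 k := by
  have g1 : ((k : Int) + 1) = ((k + 1 : Nat) : Int) := by push_cast; ring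
  rw [g1, PySem.List.pyGetD_natCast, PySem.List.pyGetD_natCast]
  have hd1 : decide ((k : Int) < (l1.length : Int) - 1) = true := by
    simp only [decide_eq_true_eq]; omega
  have hd2 : decide (k < min l1.length l2.length - 1) = true := by
    simp only [decide_eq_true_eq]; omega
  unfold pvSkip
  rw [hd1, hd2]
  simp

theorem pvStepA_fst (l1 l2 : List Char) (st : List (String × Int × String) × Int) (k : Nat) :
    (pvStepA l1 l2 st k).1 = st.1 ++
      (if pvApp l1 l2 k
       then [(String.ofList [l2.getD k ' '], st.2 + 1, String.ofList [l1.getD k ' '])]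
       else []) := by
  unfold pvStepA
  dsimp only
  by_cases happ : pvApp l1 l2 k = true
  · rw [pvApp_dash l1 l2 k happ]
    have happ' := happ
    unfold pvApp at happ'
    simp at happ'
    simp [happ, happ']
  · have h' : pvApp l1 l2 k = false := by simpa using happ
    have h'' := h'
    unfold pvApp at h''
    simp at h''
    split
    · simp
    · simp [apply_ite (f := Prod.fst)]
      exact h''

theorem pvStepA_snd (l1 l2 : List Char) (st : List (String × Int × String) × Int) (k : Nat)
    (h : k + 1 < min l1.length l2.length) :
    (pvStepA l1 l2 st k).2 = st.2 +
      (if pvSkip l1 l2 k || l1.getD k ' ' == '-' then 0 else 1) := by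
  unfold pvStepA
  dsimp only
  rw [pvSkipA_eq l1 l2 k h]
  by_cases hs : pvSkip l1 l2 k = true
  · simp [hs]
  · have hs' : pvSkip l1 l2 k = false := by simpa using hs
    by_cases hmu : l1.getD k ' ' = '-'
    · have hmu' := hmu
      simp at hmu'
      simp [hs', hmu']
    · have hmu' := hmu
      simp at hmu'
      simp [hs', hmu', apply_ite (f := Prod.snd)]

theorem pvOut_succ (l1 l2 : List Char) (k : Nat) :
    pvOut l1 l2 (k + 1) = pvOut l1 l2 k ++
      (if pvApp l1 l2 k
       then [(String.ofList [l2.getD k ' '], pvPos l1 l2 k + 1, String.ofList [l1.getD k ' '])]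
       else []) := by
  unfold pvOut
  rw [List.range_succ, List.filter_append, List.map_append, List.filter_singleton]
  have hb : (!pvSkip l1 l2 k && pvApp l1 l2 k) = pvApp l1 l2 k := by
    by_cases h : pvApp l1 l2 k = true
    · simp [h, pvApp_skip l1 l2 k h]
    · have h' : pvApp l1 l2 k = false := by simpa using h
      simp [h']
  rw [hb]
  by_cases h : pvApp l1 l2 k = true <;> simp [h]

theorem pvA_as_range (l1 l2 : List Char) :
    (List.foldl
      (fun (st : List (String × Int × String) × Int) (p : Int × Char × Char) =>
        let i := p.1
        let mu := p.2.1
        let wt := p.2.2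
        if (mu == '-' || wt == '-') &&
           (decide (i < (l1.length : Int) - 1) &&
            (PySem.List.pyGetD l1 (i + 1) ' ' == '-' || PySem.List.pyGetD l2 (i + 1) ' ' == '-'))
        then st
        else
          let st1 := if mu != wt && mu != '-' && wt != '-'
            then (st.1 ++ [(String.ofList [wt], st.2 + 1, String.ofList [mu])], st.2)
            else st
          if mu != '-' then (st1.1, st1.2 + 1) else st1)
      ([], 0) (PySem.List.enumerate (List.zip l1 l2)))
    = (List.range (min l1.length l2.length)).foldl (pvStepA l1 l2) ([], 0) := by
  rw [PySem.List.enumerate_eq_map_pyRange (List.zip l1 l2) (' ', ' ')]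
  have hlen : PySem.List.len (List.zip l1 l2) = ((min l1.length l2.length : Nat) : Int) := by
    simp [PySem.List.len]
  rw [hlen, PySem.List.pyRange_zero_nat, List.map_map, List.foldl_map]
  apply PySem.List.foldl_congr_mem
  intro st k hk
  have hk' : k < min l1.length l2.length := List.mem_range.mp hk
  have hz : PySem.List.pyGetD (List.zip l1 l2) ((k : Nat) : Int) (' ', ' ')
      = (l1.getD k ' ', l2.getD k ' ') := by
    rw [PySem.List.pyGetD_natCast]
    have h : k < (List.zip l1 l2).length := by simpa [List.length_zip] using hk'
    rw [List.getD_eq_getElem _ _ h, List.getElem_zip,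
        List.getD_eq_getElem _ _ (by omega : k < l1.length),
        List.getD_eq_getElem _ _ (by omega : k < l2.length)]
  simp only [Function.comp, hz, pvStepA]

theorem pvB_pos (l1 l2 : List Char) (k : Nat) (hk : k ≤ min l1.length l2.length) :
    (List.range k).foldl
      (fun (acc : List Int) i =>
        acc ++ [acc.getD i 0 +
          (if ((List.range (min l1.length l2.length)).map (fun i =>
                 (l1.getD i ' ' == '-' || l2.getD i ' ' == '-') &&
                 decide (i < min l1.length l2.length - 1) &&
                 (l1.getD (i + 1) ' ' == '-' || l2.getD (i + 1) ' ' == '-'))).getD i false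
              || l1.getD i ' ' == '-' then 0 else 1)])
      [0]
    = (List.range (k + 1)).map (pvPos l1 l2) := by
  induction k with
  | zero => simp [pvPos]
  | succ k ih =>
    have hk' : k < min l1.length l2.length := by omega
    rw [List.range_succ, List.foldl_append, ih (by omega)]
    simp only [List.foldl_cons, List.foldl_nil]
    rw [PySem.List.getD_map_range _ _ _ _ hk',
        PySem.List.getD_map_range _ _ _ _ (by omega : k < k + 1)]
    rw [List.range_succ (n := k + 1), List.map_append]
    simp [pvPos, pvSkip]

theorem pvB_eq_out (s1 s2 : String) :
    determine_diffs_alt s1 s2 = pvOut s1.toList s2.toList (min s1.toList.length s2.toList.length) := by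
  unfold determine_diffs_alt pvOut
  dsimp only
  rw [pvB_pos s1.toList s2.toList (min s1.toList.length s2.toList.length) (le_refl _)]
  have hfilt : List.filter (fun i =>
      !(List.map (fun i =>
          (s1.toList.getD i ' ' == '-' || s2.toList.getD i ' ' == '-') &&
          decide (i < min s1.toList.length s2.toList.length - 1) &&
          (s1.toList.getD (i + 1) ' ' == '-' || s2.toList.getD (i + 1) ' ' == '-'))
        (List.range (min s1.toList.length s2.toList.length))).getD i false &&
      s1.toList.getD i ' ' != s2.toList.getD i ' ' &&
      s1.toList.getD i ' ' != '-' && s2.toList.getD i ' ' != '-')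
      (List.range (min s1.toList.length s2.toList.length))
      = List.filter (fun i => !pvSkip s1.toList s2.toList i && pvApp s1.toList s2.toList i)
      (List.range (min s1.toList.length s2.toList.length)) := by
    apply List.filter_congr
    intro i hi
    rw [PySem.List.getD_map_range _ _ _ _ (List.mem_range.mp hi)]
    simp [pvSkip, pvApp, Bool.and_assoc]
  rw [hfilt]
  apply List.map_congr_left
  intro i hi
  have hi' : i < min s1.toList.length s2.toList.length + 1 := by
    have := List.mem_range.mp (List.mem_of_mem_filter hi); omega
  rw [PySem.List.getD_map_range _ _ _ _ hi']

-- the key invariant: after k steps A's diffs are B's output over [0,k), and (while the loop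
-- is not finished) A's position counter is B's prefix position.
theorem pvInv (l1 l2 : List Char) (k : Nat) (hk : k ≤ min l1.length l2.length) :
    ((List.range k).foldl (pvStepA l1 l2) ([], 0)).1 = pvOut l1 l2 k ∧
    (k < min l1.length l2.length →
      ((List.range k).foldl (pvStepA l1 l2) ([], 0)).2 = pvPos l1 l2 k) := by
  induction k with
  | zero => simp [pvOut, pvPos]
  | succ k ih =>
    obtain ⟨ih1, ih2⟩ := ih (by omega)
    have hpos := ih2 (by omega)
    rw [List.range_succ, List.foldl_append]
    simp only [List.foldl_cons, List.foldl_nil]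
    refine ⟨?_, ?_⟩
    · rw [pvStepA_fst, ih1, hpos, pvOut_succ]
    · intro hlt
      rw [pvStepA_snd l1 l2 _ k (by omega), hpos]
      simp [pvPos]

-- ===== VERDICT (by name: the statement is the Claim_ definition above) =====
theorem determine_diffs_spec : Claim_equal_determine_diffs := by
  unfold Claim_equal_determine_diffs
  intro s1 s2 _ _
  unfold Spec_determine_diffs determine_diffs
  dsimp only
  rw [pvB_eq_out, pvA_as_range]
  exact (pvInv s1.toList s2.toList _ (le_refl _)).1
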